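-- pv_equiv track=rewrite | github.com/thomasyeung79/korea-data-analysis | pages/7a_korea_travel_system.py | estimate_transport_cost
-- ===== SOURCE A (Python) =====
-- def extract_region_from_location(location):
--     if "(" in location and ")" in location:
--         return location.split("(")[1].replace(")", "").strip()
--
--     return location.strip()
--
-- def estimate_transport_cost(travel_route):
--     if len(travel_route) <= 1:
--         return 0
--
--     transport_cost = 0
--
--     for i in range(len(travel_route) - 1):
--         current_region = extract_region_from_location(travel_route[i])
--         next_region = extract_region_from_location(travel_route[i + 1])
--
--         if current_region == next_region:
--             transport_cost += 10
--         else: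
--             transport_cost += 45
--
--     return transport_cost
-- ===== SOURCE B (Python) =====
-- def extract_region_from_location(location):
--     if "(" in location and ")" in location:
--         return location.split("(")[1].replace(")", "").strip()
--
--     return location.strip()
--
-- def estimate_transport_cost(travel_route):
--     # View the route as maximal runs of equal region: an edge inside a run costs 10
--     # (there are n - k of those), an edge between runs costs 45 (there are k - 1).
--     if not travel_route:
--         return 0
--     runs = 1
--     prev_region = extract_region_from_location(travel_route[0])
--     for location in travel_route[1:]:
--         region = extract_region_from_location(location)
--         if region != prev_region:
--             runs += 1
--             prev_region = region
--     return 10 * (len(travel_route) - runs) + 45 * (runs - 1)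
-- ===== Notes on version B (the rewrite author's own statement) =====
-- stated objective: alternative
-- what changed: Instead of summing a 10-or-45 cost per edge (extracting both endpoints' regions each iteration) as A does, B counts the number k of maximal runs of equal region in one threaded pass that extracts each location's region exactly once, then returns the closed form 10*(n-k) + 45*(k-1).
import Mathlib
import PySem

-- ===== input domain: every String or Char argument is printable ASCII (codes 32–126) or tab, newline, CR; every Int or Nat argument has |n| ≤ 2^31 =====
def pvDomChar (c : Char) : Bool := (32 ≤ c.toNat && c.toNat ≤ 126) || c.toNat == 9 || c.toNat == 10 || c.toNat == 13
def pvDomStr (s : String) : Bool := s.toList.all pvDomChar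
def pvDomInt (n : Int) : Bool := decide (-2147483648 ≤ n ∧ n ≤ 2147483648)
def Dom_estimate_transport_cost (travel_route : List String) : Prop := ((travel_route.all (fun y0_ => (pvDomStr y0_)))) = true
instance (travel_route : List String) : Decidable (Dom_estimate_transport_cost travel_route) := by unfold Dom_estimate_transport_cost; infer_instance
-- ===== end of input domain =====

-- B drops A's per-edge 10-or-45 accumulation: it counts the number k of maximal runs of equal
-- region in one threaded pass and returns the closed form 10*(n-k) + 45*(k-1), extracting each region once instead of twice per edge (objective: alternative).

-- ===== PORT A =====
-- shared-module helper, used verbatim by both Pythons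
-- ('location.split("(")' raises only for an empty separator, which never occurs: .getD [] is unreachable;
--  the [1] index is guarded by '"(" in location', so the pyGetD default "" is unreachable too)
def extract_region_from_location (location : String) : String :=
  if PySem.Str.isIn "(" location && PySem.Str.isIn ")" location then
    PySem.Str.strip (PySem.Str.replace (PySem.List.pyGetD ((PySem.Str.split? location "(").getD []) 1 "") ")" "")
  else
    PySem.Str.strip location

def estimate_transport_cost (travel_route : List String) : Int :=
  if travel_route.length ≤ 1 then 0
  else
    (PySem.List.pyRange 0 ((travel_route.length : Int) - 1) 1).foldl
      (fun cost i =>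
        let current_region := extract_region_from_location (PySem.List.pyGetD travel_route i "")
        let next_region := extract_region_from_location (PySem.List.pyGetD travel_route (i + 1) "")
        if current_region = next_region then cost + 10 else cost + 45) 0

-- ===== PORT B =====
def estimate_transport_cost_alt (travel_route : List String) : Int :=
  match travel_route with
  | [] => 0
  | x :: xs =>
      let st := xs.foldl
        (fun (s : Int × String) location =>
          let region := extract_region_from_location location
          if region ≠ s.2 then (s.1 + 1, region) else s)
        (1, extract_region_from_location x)
      10 * ((travel_route.length : Int) - st.1) + 45 * (st.1 - 1)

-- ===== PRECONDITION & SPEC =====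
def Spec_estimate_transport_cost (travel_route : List String) (out : Int) : Prop := out = estimate_transport_cost_alt travel_route
instance (travel_route : List String) (out : Int) : Decidable (Spec_estimate_transport_cost travel_route out) := by unfold Spec_estimate_transport_cost; infer_instance

-- ===== CLAIM (what is proved, stated in full; the proofs are below) =====
def Claim_equal_estimate_transport_cost : Prop := ∀ (travel_route : List String), Dom_estimate_transport_cost travel_route → Spec_estimate_transport_cost travel_route (estimate_transport_cost travel_route)

-- ===== LEMMAS AND PROOFS =====

-- edge cost between two consecutive stops
def pvCost (x y : String) : Int :=
  if extract_region_from_location x = extract_region_from_location y then 10 else 45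

-- number of region changes along rest, starting from region prev
def pvChg (prev : String) : List String → Int
  | [] => 0
  | x :: xs =>
      (if extract_region_from_location x ≠ prev then 1 else 0)
        + pvChg (extract_region_from_location x) xs

-- A's indexed fold is the sum of the per-edge costs
lemma A_sum (xs : List String) (h : 2 ≤ xs.length) :
    estimate_transport_cost xs =
      ((List.range (xs.length - 1)).map
        (fun k => pvCost (xs.getD k "") (xs.getD (k+1) ""))).sum := by
  unfold estimate_transport_cost
  rw [if_neg (by omega)]
  rw [PySem.List.pyRange_one]
  rw [List.foldl_map]
  have hto : ((xs.length:Int) - 1 - 0).toNat = xs.length - 1 := by omega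
  rw [hto]
  refine Eq.trans (PySem.List.foldl_congr_mem _ _
      (fun acc k => acc + pvCost (xs.getD k "") (xs.getD (k+1) "")) _ ?_) ?_
  · intro acc k hk
    simp only [zero_add]
    have h2 : ((k:Int) + 1) = ((k + 1 : Nat) : Int) := by push_cast; ring
    rw [h2]
    simp only [PySem.List.pyGetD_natCast, pvCost]
    split <;> rfl
  · rw [PySem.List.foldl_add (g := fun k => pvCost (xs.getD k "") (xs.getD (k+1) ""))]
    rw [zero_add]

lemma A_cons (x y : String) (rest : List String) :
    estimate_transport_cost (x :: y :: rest)
      = pvCost x y + estimate_transport_cost (y :: rest) := by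
  cases rest with
  | nil =>
      rw [A_sum _ (by simp)]
      simp [estimate_transport_cost, pvCost]
  | cons z rs =>
      rw [A_sum _ (by simp), A_sum _ (by simp)]
      have hlen : (x :: y :: z :: rs).length - 1 = ((y :: z :: rs).length - 1) + 1 := by simp
      rw [hlen, List.range_succ_eq_map, List.map_cons, List.sum_cons, List.map_map]
      simp [Function.comp_def, Nat.succ_eq_add_one]

-- A's cost from a head stop with region prev is 10 per edge plus 35 per region change
lemma A_chg : ∀ (rest : List String) (y : String),
    estimate_transport_cost (y :: rest)
      = 10 * (rest.length : Int) + 35 * pvChg (extract_region_from_location y) rest := by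
  intro rest
  induction rest with
  | nil => intro y; simp [estimate_transport_cost, pvChg]
  | cons z rs ih =>
      intro y
      rw [A_cons, ih z]
      simp only [pvChg, pvCost, List.length_cons]
      by_cases h : extract_region_from_location z = extract_region_from_location y
      · rw [if_pos h.symm, if_neg (by simp [h])]
        push_cast; ring
      · rw [if_neg (fun hh => h hh.symm), if_pos (by simp [h])]
        push_cast; ring

-- B's fold computes the initial run count plus the number of region changes
lemma B_fold : ∀ (rest : List String) (r0 : Int) (prev : String),
    (rest.foldl
      (fun (s : Int × String) location =>
        let region := extract_region_from_location location
        if region ≠ s.2 then (s.1 + 1, region) else s)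
      (r0, prev)).1 = r0 + pvChg prev rest := by
  intro rest
  induction rest with
  | nil => intro r0 prev; simp [pvChg]
  | cons z rs ih =>
      intro r0 prev
      simp only [List.foldl_cons, pvChg]
      by_cases h : extract_region_from_location z = prev
      · rw [if_neg (by simp [h]), if_neg (by simp [h]), ih, h]
        ring
      · rw [if_pos (by simp [h]), if_pos (by simp [h]), ih]
        ring

theorem ab_eq (tr : List String) :
    estimate_transport_cost tr = estimate_transport_cost_alt tr := by
  cases tr with
  | nil => rfl
  | cons x xs =>
      unfold estimate_transport_cost_alt
      rw [A_chg xs x]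
      simp only [B_fold, List.length_cons]
      push_cast
      ring

-- ===== VERDICT (by name: the statement is the Claim_ definition above) =====
theorem estimate_transport_cost_spec : Claim_equal_estimate_transport_cost := by
  intro tr _
  unfold Spec_estimate_transport_cost
  exact ab_eq tr
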